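-- pv_equiv track=rewrite | github.com/strong1133/hh99_cpt2_Algorithm | altari/programmers/level01/stranger_char.py | solution
-- ===== SOURCE A (Python) =====
-- def solution(s):
--     ss = s.split(" ")
--     for x in range(len(ss)):
--         arr = list(ss[x])
--
--         for i in range(len(arr)):
--             if i % 2 == 0:
--                 arr[i] = arr[i].upper()
--             elif i % 2 == 1:
--                 arr[i] = arr[i].lower()
--         ss[x] = "".join(arr)
--
--     ans = " ".join(ss)
--     return ans
-- ===== SOURCE B (Python) =====
-- def solution(s):
--     out = []
--     cnt = 0
--     for ch in s:
--         if ch == ' ':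
--             out.append(' ')
--             cnt = 0
--         else:
--             out.append(ch.upper() if cnt % 2 == 0 else ch.lower())
--             cnt += 1
--     return ''.join(out)
-- ===== Notes on version B (the rewrite author's own statement) =====
-- stated objective: simpler
-- what changed: Replaced split-on-space / per-word index loop with in-place element assignment / rejoin by a single pass over the characters with a position counter that resets at each space.
import Mathlib
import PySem

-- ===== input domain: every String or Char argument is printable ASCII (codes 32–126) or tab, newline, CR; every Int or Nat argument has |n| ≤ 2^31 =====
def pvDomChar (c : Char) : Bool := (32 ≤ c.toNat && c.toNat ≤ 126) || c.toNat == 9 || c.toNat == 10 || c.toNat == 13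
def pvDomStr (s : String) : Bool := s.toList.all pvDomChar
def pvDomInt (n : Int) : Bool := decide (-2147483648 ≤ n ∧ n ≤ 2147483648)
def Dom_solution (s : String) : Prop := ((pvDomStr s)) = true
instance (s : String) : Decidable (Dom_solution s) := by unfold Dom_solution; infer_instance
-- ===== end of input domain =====

-- B replaces A's split / per-word indexed loop / rejoin by one pass over the characters
-- with a counter that resets at each space (objective: simpler).

-- ===== PORT A =====
def solution (s : String) : String :=
  -- ss = s.split(" ")
  let ss := PySem.Chars.splitOn s.toList [' ']
  -- for x in range(len(ss)): arr = list(ss[x]); for i in range(len(arr)): …; ss[x] = "".join(arr)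
  let ss2 := ss.map (fun w =>
    (List.range w.length).foldl (fun arr i =>
      if i % 2 == 0 then arr.set i (PySem.Chars.upperChar (arr.getD i ' '))
      else arr.set i (PySem.Chars.lowerChar (arr.getD i ' '))) w)
  -- ans = " ".join(ss)
  String.ofList (PySem.Chars.join [' '] ss2)

-- ===== PORT B =====
def solution_alt (s : String) : String :=
  let r := s.toList.foldl (fun (st : List Char × Nat) ch =>
    if ch = ' ' then (st.1 ++ [' '], 0)
    else (st.1 ++ [if st.2 % 2 == 0 then PySem.Chars.upperChar ch else PySem.Chars.lowerChar ch],
          st.2 + 1)) ([], 0)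
  String.ofList r.1

-- ===== PRECONDITION & SPEC =====
def Spec_solution (s : String) (out : String) : Prop := out = solution_alt s
instance (s : String) (out : String) : Decidable (Spec_solution s out) := by unfold Spec_solution; infer_instance

-- ===== CLAIM (what is proved, stated in full; the proofs are below) =====
def Claim_equal_solution : Prop := ∀ (s : String), Dom_solution s → Spec_solution s (solution s)

-- ===== LEMMAS AND PROOFS =====

-- alternately case a word starting at position n
def capW : List Char → Nat → List Char
  | [], _ => []
  | c :: r, n =>
      (if n % 2 == 0 then PySem.Chars.upperChar c else PySem.Chars.lowerChar c) :: capW r (n + 1)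

-- B's stream, counter n inside the current word
def streamB : List Char → Nat → List Char
  | [], _ => []
  | c :: r, n =>
      if c = ' ' then ' ' :: streamB r 0
      else (if n % 2 == 0 then PySem.Chars.upperChar c else PySem.Chars.lowerChar c) :: streamB r (n + 1)

-- splitting on a single space, current word accumulated in order
def split1 : List Char → List Char → List (List Char)
  | cur, [] => [cur]
  | cur, c :: r => if c = ' ' then cur :: split1 [] r else split1 (cur ++ [c]) r

theorem go_spec (fuel : Nat) : ∀ (l cur : List Char) (acc : List (List Char)), l.length ≤ fuel →
    PySem.Chars.splitOn.go [' '] fuel l cur acc = acc.reverse ++ split1 cur.reverse l := by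
  induction fuel with
  | zero =>
      intro l cur acc h
      have hl : l = [] := List.eq_nil_of_length_eq_zero (Nat.le_zero.mp h)
      subst hl
      simp [PySem.Chars.splitOn.go, split1]
  | succ fuel ih =>
      intro l cur acc h
      cases l with
      | nil => simp [PySem.Chars.splitOn.go, split1]
      | cons c rest =>
          by_cases hc : c = ' '
          · subst hc
            rw [show PySem.Chars.splitOn.go [' '] (fuel + 1) (' ' :: rest) cur acc
                  = PySem.Chars.splitOn.go [' '] fuel rest [] (cur.reverse :: acc) by
                simp [PySem.Chars.splitOn.go, List.isPrefixOf]]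
            rw [ih rest [] _ (by simpa using h)]
            simp [split1]
          · rw [show PySem.Chars.splitOn.go [' '] (fuel + 1) (c :: rest) cur acc
                  = PySem.Chars.splitOn.go [' '] fuel rest (c :: cur) acc by
                simp [PySem.Chars.splitOn.go, List.isPrefixOf, Ne.symm hc]]
            rw [ih rest (c :: cur) acc (by simpa using h)]
            simp [split1, hc]

theorem splitOn_eq_split1 (cs : List Char) :
    PySem.Chars.splitOn cs [' '] = split1 [] cs := by
  rw [PySem.Chars.splitOn, go_spec (cs.length + 1) cs [] [] (Nat.le_succ _)]
  simp

theorem loopA_eq_capW (rest : List Char) : ∀ done : List Char,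
    (List.range' done.length rest.length).foldl (fun arr i =>
      if i % 2 == 0 then arr.set i (PySem.Chars.upperChar (arr.getD i ' '))
      else arr.set i (PySem.Chars.lowerChar (arr.getD i ' '))) (done ++ rest)
    = done ++ capW rest done.length := by
  induction rest with
  | nil => intro done; simp [capW]
  | cons c rs ih =>
      intro done
      rw [List.length_cons, List.range'_succ, List.foldl_cons]
      have hget : (done ++ c :: rs).getD done.length ' ' = c := by
        simp [List.getD]
      have hset : ∀ x : Char, (done ++ c :: rs).set done.length x = (done ++ [x]) ++ rs := by
        intro x
        rw [List.set_append_right _ _ (Nat.le_refl _)]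
        simp
      by_cases hp : done.length % 2 = 0
      · rw [if_pos (by simpa using hp), hget, hset]
        have h2 := ih (done ++ [PySem.Chars.upperChar c])
        rw [show (done ++ [PySem.Chars.upperChar c]).length = done.length + 1 by simp] at h2
        rw [h2]
        simp [capW, hp]
      · rw [if_neg (by simpa using hp), hget, hset]
        have h2 := ih (done ++ [PySem.Chars.lowerChar c])
        rw [show (done ++ [PySem.Chars.lowerChar c]).length = done.length + 1 by simp] at h2
        rw [h2]
        simp [capW, hp]

theorem capW_append (a : List Char) : ∀ (b : List Char) (n : Nat),
    capW (a ++ b) n = capW a n ++ capW b (n + a.length) := by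
  induction a with
  | nil => intro b n; simp [capW]
  | cons c r ih =>
      intro b n
      simp only [List.cons_append, capW, ih, List.length_cons]
      simp [Nat.add_assoc, Nat.add_comm 1 r.length]

theorem foldlB (cs : List Char) : ∀ (acc : List Char) (n : Nat),
    (cs.foldl (fun (st : List Char × Nat) ch =>
      if ch = ' ' then (st.1 ++ [' '], 0)
      else (st.1 ++ [if st.2 % 2 == 0 then PySem.Chars.upperChar ch else PySem.Chars.lowerChar ch],
            st.2 + 1)) (acc, n)).1 = acc ++ streamB cs n := by
  induction cs with
  | nil => intro acc n; simp [streamB]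
  | cons c r ih =>
      intro acc n
      by_cases hc : c = ' '
      · subst hc
        rw [List.foldl_cons, if_pos rfl, ih]
        simp [streamB]
      · rw [List.foldl_cons, if_neg hc, ih]
        simp [streamB, hc]

theorem split1_ne_nil (cur cs : List Char) : split1 cur cs ≠ [] := by
  induction cs generalizing cur with
  | nil => simp [split1]
  | cons c r ih => by_cases hc : c = ' ' <;> simp [split1, hc, ih]

theorem main_lemma (cs : List Char) : ∀ w : List Char,
    PySem.Chars.join [' '] ((split1 w cs).map (fun v => capW v 0)) = capW w 0 ++ streamB cs w.length := by
  induction cs with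
  | nil => intro w; simp [split1, streamB, PySem.Chars.join, List.intercalate]
  | cons c r ih =>
      intro w
      by_cases hc : c = ' '
      · subst hc
        rw [show split1 w (' ' :: r) = w :: split1 [] r by simp [split1]]
        obtain ⟨h, t, ht⟩ : ∃ h t, split1 [] r = h :: t := by
          cases hsp : split1 [] r with
          | nil => exact absurd hsp (split1_ne_nil [] r)
          | cons h t => exact ⟨h, t, rfl⟩
        rw [ht, List.map_cons, List.map_cons, PySem.Chars.join_cons_cons]
        have h0 := ih []
        rw [ht, List.map_cons] at h0
        simp only [capW, List.length_nil, List.nil_append] at h0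
        rw [h0]
        simp [streamB]
      · rw [show split1 w (c :: r) = split1 (w ++ [c]) r by simp [split1, hc]]
        rw [ih (w ++ [c]), capW_append]
        simp [capW, streamB, hc]

-- ===== VERDICT (by name: the statement is the Claim_ definition above) =====
theorem solution_spec : Claim_equal_solution := by
  intro s _
  show solution s = solution_alt s
  simp only [solution, solution_alt]
  rw [splitOn_eq_split1, foldlB]
  have hmap : ∀ w : List Char,
      (List.range w.length).foldl (fun arr i =>
        if i % 2 == 0 then arr.set i (PySem.Chars.upperChar (arr.getD i ' '))
        else arr.set i (PySem.Chars.lowerChar (arr.getD i ' '))) w = capW w 0 := by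
    intro w
    have := loopA_eq_capW w []
    simpa [List.range_eq_range'] using this
  rw [List.map_congr_left (fun w _ => hmap w)]
  have h0 := main_lemma s.toList []
  simp only [capW, List.length_nil, List.nil_append] at h0
  rw [h0]
  simp
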